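-- pv_equiv track=rewrite | github.com/nestauk/old_nesta_daps | nesta/core/luigihacks/elasticsearchplus.py | _clean_bad_unicode_conversion
-- ===== SOURCE A (Python) =====
-- from copy import deepcopy
--
-- def _clean_bad_unicode_conversion(row):
--     """Removes sequences of ??? from strings, which normally
--     occur due to bad unicode conversion. Note this is a hack:
--     the real solution is to deal with unicode gracefully, where
--     the option is available.
--
--     Args:
--         row (dict): Row of data to evaluate.
--     Returns:
--         _row (dict): Modified row.
--     """
--     _row = deepcopy(row)
--     for k, v in row.items():
--         if type(v) is not str:
--             continue
--         elif "??" not in v: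
--             continue
--         while "???" in v:
--             v = v.replace("???","")
--         while "??" in v:
--             v = v.replace("??","")
--         _row[k] = v
--     return _row
-- ===== SOURCE B (Python) =====
-- from copy import deepcopy
--
-- def _clean_bad_unicode_conversion(row):
--     """Single-pass variant: each maximal run of '?' collapses to '?' if its
--     length is 1 mod 3, else to '' (what A's repeated replaces compute)."""
--     _row = deepcopy(row)
--     for k, v in row.items():
--         if type(v) is not str or "??" not in v:
--             continue
--         out = []
--         i, n = 0, len(v)
--         while i < n:
--             ch = v[i]
--             if ch != "?":
--                 out.append(ch)
--                 i += 1
--             else: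
--                 j = i + 1
--                 while j < n and v[j] == "?":
--                     j += 1
--                 if (j - i) % 3 == 1:
--                     out.append("?")
--                 i = j
--         _row[k] = "".join(out)
--     return _row
-- ===== Notes on version B (the rewrite author's own statement) =====
-- stated objective: alternative
-- what changed: Replaces the two repeated whole-string str.replace while-loops with a single left-to-right pass that measures each maximal run of '?' and emits '?' iff the run length is 1 mod 3, else nothing.
import Mathlib
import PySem

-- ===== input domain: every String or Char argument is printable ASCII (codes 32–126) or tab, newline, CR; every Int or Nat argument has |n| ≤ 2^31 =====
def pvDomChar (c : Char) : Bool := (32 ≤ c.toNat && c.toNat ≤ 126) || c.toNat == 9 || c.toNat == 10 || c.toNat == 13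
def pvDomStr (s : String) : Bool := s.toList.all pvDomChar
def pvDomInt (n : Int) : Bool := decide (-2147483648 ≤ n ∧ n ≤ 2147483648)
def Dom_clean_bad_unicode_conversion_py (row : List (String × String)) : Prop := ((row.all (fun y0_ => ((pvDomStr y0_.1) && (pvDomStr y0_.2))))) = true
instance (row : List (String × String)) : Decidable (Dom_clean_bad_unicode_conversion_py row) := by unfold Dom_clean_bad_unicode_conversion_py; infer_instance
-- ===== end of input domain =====

-- B replaces A's two repeated whole-string replace loops with a single pass over each
-- value that rewrites every maximal run of '?' in closed form (alternative, same cost).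

-- ===== PORT A =====
-- 'while pat in v: v = v.replace(pat, "")'; the fuel (length + 1) only makes the loop total
def pvWhileRepl (pat : List Char) : Nat → List Char → List Char
  | 0, v => v
  | f+1, v =>
    if PySem.Chars.isIn pat v then pvWhileRepl pat f (PySem.Chars.replace v pat []) else v

def clean_bad_unicode_conversion_py (row : List (String × String)) : List (String × String) :=
  (row.foldl (fun (acc : PySem.Dict String String) kv =>
    if PySem.Chars.isIn ['?', '?'] kv.2.toList = false then acc
    else
      let v1 := pvWhileRepl ['?', '?', '?'] (kv.2.toList.length + 1) kv.2.toList
      let v2 := pvWhileRepl ['?', '?'] (v1.length + 1) v1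
      PySem.Dict.insert acc kv.1 (String.ofList v2)) (PySem.Dict.mk row)).items

-- ===== PORT B =====
-- single left-to-right pass: a maximal run of n '?'s becomes '?' iff n % 3 == 1, else ''
def pvScanB : List Char → List Char
  | [] => []
  | c :: cs =>
    if c ≠ '?' then c :: pvScanB cs
    else
      (if ((cs.takeWhile (· == '?')).length + 1) % 3 = 1 then ['?'] else []) ++
        pvScanB (cs.dropWhile (· == '?'))
termination_by l => l.length
decreasing_by
  · simp
  · exact Nat.lt_succ_of_le (List.length_dropWhile_le _ _)

def clean_bad_unicode_conversion_py_alt (row : List (String × String)) : List (String × String) :=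
  (row.foldl (fun (acc : PySem.Dict String String) kv =>
    if PySem.Chars.isIn ['?', '?'] kv.2.toList = false then acc
    else PySem.Dict.insert acc kv.1 (String.ofList (pvScanB kv.2.toList))) (PySem.Dict.mk row)).items

-- ===== PRECONDITION & SPEC =====
def Spec_clean_bad_unicode_conversion_py (row : List (String × String)) (out : List (String × String)) : Prop := out = clean_bad_unicode_conversion_py_alt row
instance (row : List (String × String)) (out : List (String × String)) : Decidable (Spec_clean_bad_unicode_conversion_py row out) := by unfold Spec_clean_bad_unicode_conversion_py; infer_instance

-- ===== CLAIM (what is proved, stated in full; the proofs are below) =====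
def Claim_equal_clean_bad_unicode_conversion_py : Prop := ∀ (row : List (String × String)), Dom_clean_bad_unicode_conversion_py row → Spec_clean_bad_unicode_conversion_py row (clean_bad_unicode_conversion_py row)

-- ===== LEMMAS AND PROOFS =====

-- proof model of one simultaneous left-to-right pass of v.replace("???", "")
def rep3 : List Char → List Char
  | [] => []
  | c :: t =>
    if c = '?' ∧ t.take 2 = ['?', '?'] then rep3 (t.drop 2) else c :: rep3 t
termination_by l => l.length
decreasing_by all_goals simp

-- likewise for v.replace("??", "")
def rep2 : List Char → List Char
  | [] => []
  | c :: t =>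
    if c = '?' ∧ t.take 1 = ['?'] then rep2 (t.drop 1) else c :: rep2 t
termination_by l => l.length
decreasing_by all_goals simp

lemma rep3_cons (c : Char) (t : List Char) :
    rep3 (c :: t) = if c = '?' ∧ t.take 2 = ['?', '?'] then rep3 (t.drop 2) else c :: rep3 t := by
  rw [rep3.eq_def]

lemma rep3_nil : rep3 [] = [] := by rw [rep3.eq_def]

lemma rep2_cons (c : Char) (t : List Char) :
    rep2 (c :: t) = if c = '?' ∧ t.take 1 = ['?'] then rep2 (t.drop 1) else c :: rep2 t := by
  rw [rep2.eq_def]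

lemma rep2_nil : rep2 [] = [] := by rw [rep2.eq_def]

lemma prefix3_iff (c : Char) (t : List Char) :
    List.isPrefixOf ['?', '?', '?'] (c :: t) = true ↔ (c = '?' ∧ t.take 2 = ['?', '?']) := by
  rw [List.isPrefixOf_iff_prefix, List.cons_prefix_cons]
  constructor
  · rintro ⟨h1, h2⟩
    exact ⟨h1.symm, (List.prefix_iff_eq_take.mp h2).symm⟩
  · rintro ⟨h1, h2⟩
    exact ⟨h1.symm, List.prefix_iff_eq_take.mpr h2.symm⟩

lemma prefix2_iff (c : Char) (t : List Char) :
    List.isPrefixOf ['?', '?'] (c :: t) = true ↔ (c = '?' ∧ t.take 1 = ['?']) := by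
  rw [List.isPrefixOf_iff_prefix, List.cons_prefix_cons]
  constructor
  · rintro ⟨h1, h2⟩
    exact ⟨h1.symm, (List.prefix_iff_eq_take.mp h2).symm⟩
  · rintro ⟨h1, h2⟩
    exact ⟨h1.symm, List.prefix_iff_eq_take.mpr h2.symm⟩

lemma go3_spec (fuel : Nat) : ∀ (l acc : List Char), l.length ≤ fuel →
    PySem.Chars.replace.go ['?', '?', '?'] [] fuel l acc = acc.reverse ++ rep3 l := by
  induction fuel with
  | zero =>
    intro l acc hl
    have : l = [] := by cases l <;> simp_all
    subst this
    rw [PySem.Chars.replace.go.eq_def, rep3_nil]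
  | succ f ih =>
    intro l acc hl
    cases l with
    | nil => rw [PySem.Chars.replace.go.eq_def, rep3_nil]; simp
    | cons c t =>
      rw [PySem.Chars.replace.go.eq_def]
      simp only []
      by_cases hp : List.isPrefixOf ['?', '?', '?'] (c :: t) = true
      · rw [if_pos hp]
        have hcond := (prefix3_iff c t).mp hp
        have hlen : (t.drop 2).length ≤ f := by simp at hl ⊢; omega
        simp only [List.length_cons, List.length_nil, List.drop_succ_cons,
          List.reverse_nil, List.nil_append]
        rw [ih _ _ hlen, rep3_cons, if_pos hcond]
      · rw [if_neg hp]
        have hlen : t.length ≤ f := by simp at hl; omega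
        rw [ih _ _ hlen, rep3_cons, if_neg (fun h => hp ((prefix3_iff c t).mpr h))]
        simp

lemma go2_spec (fuel : Nat) : ∀ (l acc : List Char), l.length ≤ fuel →
    PySem.Chars.replace.go ['?', '?'] [] fuel l acc = acc.reverse ++ rep2 l := by
  induction fuel with
  | zero =>
    intro l acc hl
    have : l = [] := by cases l <;> simp_all
    subst this
    rw [PySem.Chars.replace.go.eq_def, rep2_nil]
  | succ f ih =>
    intro l acc hl
    cases l with
    | nil => rw [PySem.Chars.replace.go.eq_def, rep2_nil]; simp
    | cons c t =>
      rw [PySem.Chars.replace.go.eq_def]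
      simp only []
      by_cases hp : List.isPrefixOf ['?', '?'] (c :: t) = true
      · rw [if_pos hp]
        have hcond := (prefix2_iff c t).mp hp
        have hlen : (t.drop 1).length ≤ f := by simp at hl ⊢; omega
        simp only [List.length_cons, List.length_nil, List.drop_succ_cons,
          List.reverse_nil, List.nil_append]
        rw [ih _ _ hlen, rep2_cons, if_pos hcond]
      · rw [if_neg hp]
        have hlen : t.length ≤ f := by simp at hl; omega
        rw [ih _ _ hlen, rep2_cons, if_neg (fun h => hp ((prefix2_iff c t).mpr h))]
        simp

lemma replace_eq_rep3 (v : List Char) : PySem.Chars.replace v ['?', '?', '?'] [] = rep3 v := by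
  rw [PySem.Chars.replace]
  simp only [List.isEmpty_cons, if_false, Bool.false_eq_true]
  simpa using go3_spec v.length v [] (le_refl _)

lemma replace_eq_rep2 (v : List Char) : PySem.Chars.replace v ['?', '?'] [] = rep2 v := by
  rw [PySem.Chars.replace]
  simp only [List.isEmpty_cons, if_false, Bool.false_eq_true]
  simpa using go2_spec v.length v [] (le_refl _)

lemma rep3_repl_cons (c : Char) (hc : c ≠ '?') : ∀ (n : Nat) (t : List Char),
    rep3 (List.replicate n '?' ++ c :: t) = List.replicate (n % 3) '?' ++ c :: rep3 t := by
  intro n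
  induction n using Nat.strong_induction_on with
  | _ n IH =>
    intro t
    match n with
    | 0 => simp [rep3_cons, hc]
    | 1 => simp [rep3_cons, hc, List.take_succ_cons]
    | 2 => simp [rep3_cons, hc]
    | (m+3) =>
      have h3 : (m + 3) % 3 = m % 3 := by omega
      have : List.replicate (m+3) '?' ++ c :: t = '?' :: '?' :: '?' :: (List.replicate m '?' ++ c :: t) := by
        simp [List.replicate_succ]
      rw [this, rep3_cons, if_pos (by simp), h3]
      simpa using IH m (by omega) t

lemma rep3_repl (n : Nat) : rep3 (List.replicate n '?') = List.replicate (n % 3) '?' := by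
  induction n using Nat.strong_induction_on with
  | _ n IH =>
    match n with
    | 0 => simp [rep3]
    | 1 => simp [rep3_cons]; exact rep3_nil
    | 2 => simp [rep3_cons]; exact rep3_nil
    | (m+3) =>
      have h3 : (m + 3) % 3 = m % 3 := by omega
      have : List.replicate (m+3) '?' = '?' :: '?' :: '?' :: List.replicate m '?' := by
        simp [List.replicate_succ]
      rw [this, rep3_cons, if_pos (by simp), h3]
      simpa using IH m (by omega)

lemma rep2_repl_cons (c : Char) (hc : c ≠ '?') : ∀ (n : Nat) (t : List Char),
    rep2 (List.replicate n '?' ++ c :: t) = List.replicate (n % 2) '?' ++ c :: rep2 t := by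
  intro n
  induction n using Nat.strong_induction_on with
  | _ n IH =>
    intro t
    match n with
    | 0 => simp [rep2_cons, hc]
    | 1 => simp [rep2_cons, hc, List.take_succ_cons]
    | (m+2) =>
      have h2 : (m + 2) % 2 = m % 2 := by omega
      have : List.replicate (m+2) '?' ++ c :: t = '?' :: '?' :: (List.replicate m '?' ++ c :: t) := by
        simp [List.replicate_succ]
      rw [this, rep2_cons, if_pos (by simp), h2]
      simpa using IH m (by omega) t

lemma rep2_repl (n : Nat) : rep2 (List.replicate n '?') = List.replicate (n % 2) '?' := by
  induction n using Nat.strong_induction_on with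
  | _ n IH =>
    match n with
    | 0 => simp [rep2]
    | 1 => simp [rep2_cons]; exact rep2_nil
    | (m+2) =>
      have h2 : (m + 2) % 2 = m % 2 := by omega
      have : List.replicate (m+2) '?' = '?' :: '?' :: List.replicate m '?' := by
        simp [List.replicate_succ]
      rw [this, rep2_cons, if_pos (by simp), h2]
      simpa using IH m (by omega)

-- every list of chars is a leading run of '?' followed by nothing or a non-'?' head
lemma run_cases (v : List Char) :
    (∃ n, v = List.replicate n '?') ∨
    (∃ n c t, c ≠ '?' ∧ v = List.replicate n '?' ++ c :: t) := by
  induction v with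
  | nil => exact Or.inl ⟨0, rfl⟩
  | cons c t ih =>
    by_cases hc : c = '?'
    · subst hc
      rcases ih with ⟨n, rfl⟩ | ⟨n, c', t', hc', rfl⟩
      · exact Or.inl ⟨n + 1, rfl⟩
      · exact Or.inr ⟨n + 1, c', t', hc', rfl⟩
    · exact Or.inr ⟨0, c, t, hc, rfl⟩

lemma rep3_idem (v : List Char) : rep3 (rep3 v) = rep3 v := by
  generalize hL : v.length = L
  induction L using Nat.strong_induction_on generalizing v with
  | _ L IH =>
    rcases run_cases v with ⟨n, rfl⟩ | ⟨n, c, t, hc, rfl⟩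
    · rw [rep3_repl, rep3_repl]
      congr 1
      omega
    · rw [rep3_repl_cons c hc, rep3_repl_cons c hc]
      have ht : t.length < L := by simp at hL; omega
      rw [IH t.length ht t rfl]
      congr 2
      omega

lemma rep2_idem (v : List Char) : rep2 (rep2 v) = rep2 v := by
  generalize hL : v.length = L
  induction L using Nat.strong_induction_on generalizing v with
  | _ L IH =>
    rcases run_cases v with ⟨n, rfl⟩ | ⟨n, c, t, hc, rfl⟩
    · rw [rep2_repl, rep2_repl]
      congr 1
      omega
    · rw [rep2_repl_cons c hc, rep2_repl_cons c hc]
      have ht : t.length < L := by simp at hL; omega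
      rw [IH t.length ht t rfl]
      congr 2
      omega

lemma rep3_of_isIn_false (v : List Char) (h : PySem.Chars.isIn ['?', '?', '?'] v = false) :
    rep3 v = v := by
  induction v with
  | nil => exact rep3_nil
  | cons c t ih =>
    have hnf : ¬ (['?', '?', '?'] : List Char) <:+: c :: t := (PySem.Chars.isIn_eq_false_iff _ _).mp h
    have hcond : ¬ (c = '?' ∧ t.take 2 = ['?', '?']) := by
      rintro ⟨hc, h2⟩
      exact hnf (List.isPrefixOf_iff_prefix.mp ((prefix3_iff c t).mpr ⟨hc, h2⟩)).isInfix
    have ht : PySem.Chars.isIn ['?', '?', '?'] t = false := by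
      rw [PySem.Chars.isIn_eq_false_iff] at *
      exact fun hi => hnf (List.infix_cons hi)
    rw [rep3_cons, if_neg hcond, ih ht]

lemma rep2_of_isIn_false (v : List Char) (h : PySem.Chars.isIn ['?', '?'] v = false) :
    rep2 v = v := by
  induction v with
  | nil => exact rep2_nil
  | cons c t ih =>
    have hnf : ¬ (['?', '?'] : List Char) <:+: c :: t := (PySem.Chars.isIn_eq_false_iff _ _).mp h
    have hcond : ¬ (c = '?' ∧ t.take 1 = ['?']) := by
      rintro ⟨hc, h2⟩
      exact hnf (List.isPrefixOf_iff_prefix.mp ((prefix2_iff c t).mpr ⟨hc, h2⟩)).isInfix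
    have ht : PySem.Chars.isIn ['?', '?'] t = false := by
      rw [PySem.Chars.isIn_eq_false_iff] at *
      exact fun hi => hnf (List.infix_cons hi)
    rw [rep2_cons, if_neg hcond, ih ht]

lemma whileRepl_const (pat : List Char) (f : Nat) (x : List Char)
    (h : PySem.Chars.replace x pat [] = x) : pvWhileRepl pat f x = x := by
  induction f with
  | zero => rfl
  | succ f ih => simp only [pvWhileRepl, h]; split <;> [exact ih; rfl]

lemma while3_eq (f : Nat) (v : List Char) : pvWhileRepl ['?', '?', '?'] (f + 1) v = rep3 v := by
  simp only [pvWhileRepl]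
  by_cases h : PySem.Chars.isIn ['?', '?', '?'] v = true
  · rw [if_pos h, replace_eq_rep3]
    exact whileRepl_const _ _ _ (by rw [replace_eq_rep3, rep3_idem])
  · rw [if_neg h]
    exact (rep3_of_isIn_false v (by simpa using h)).symm

lemma while2_eq (f : Nat) (v : List Char) : pvWhileRepl ['?', '?'] (f + 1) v = rep2 v := by
  simp only [pvWhileRepl]
  by_cases h : PySem.Chars.isIn ['?', '?'] v = true
  · rw [if_pos h, replace_eq_rep2]
    exact whileRepl_const _ _ _ (by rw [replace_eq_rep2, rep2_idem])
  · rw [if_neg h]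
    exact (rep2_of_isIn_false v (by simpa using h)).symm

lemma scanB_cons (c : Char) (cs : List Char) :
    pvScanB (c :: cs) =
      if c ≠ '?' then c :: pvScanB cs
      else
        (if ((cs.takeWhile (· == '?')).length + 1) % 3 = 1 then ['?'] else []) ++
          pvScanB (cs.dropWhile (· == '?')) := by
  rw [pvScanB.eq_def]

lemma scan_repl (n : Nat) :
    pvScanB (List.replicate n '?') = if n % 3 = 1 then ['?'] else [] := by
  match n with
  | 0 => simp [pvScanB]
  | (m+1) =>
    rw [List.replicate_succ, scanB_cons]
    simp [pvScanB]

lemma tw_repl_cons (c : Char) (hc : c ≠ '?') (n : Nat) (t : List Char) :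
    (List.replicate n '?' ++ c :: t).takeWhile (· == '?') = List.replicate n '?' := by
  induction n with
  | zero => simp [hc]
  | succ m ih => simp [List.replicate_succ, ih]

lemma dw_repl_cons (c : Char) (hc : c ≠ '?') (n : Nat) (t : List Char) :
    (List.replicate n '?' ++ c :: t).dropWhile (· == '?') = c :: t := by
  induction n with
  | zero => simp [hc]
  | succ m ih => simp [List.replicate_succ, ih]

lemma scan_repl_cons (c : Char) (hc : c ≠ '?') (n : Nat) (t : List Char) :
    pvScanB (List.replicate n '?' ++ c :: t) =
      (if n % 3 = 1 then ['?'] else []) ++ c :: pvScanB t := by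
  match n with
  | 0 => simp [scanB_cons, hc]
  | (m+1) =>
    rw [List.replicate_succ, List.cons_append, scanB_cons]
    simp only [tw_repl_cons c hc, dw_repl_cons c hc, List.length_replicate]
    simp [scanB_cons, hc]

lemma repl_mod_eq_ite (n : Nat) :
    List.replicate (n % 3 % 2) '?' = if n % 3 = 1 then ['?'] else ([] : List Char) := by
  have h : n % 3 = 0 ∨ n % 3 = 1 ∨ n % 3 = 2 := by omega
  rcases h with h | h | h <;> simp [h]

lemma rep2_rep3_eq_scan (v : List Char) : rep2 (rep3 v) = pvScanB v := by
  generalize hL : v.length = L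
  induction L using Nat.strong_induction_on generalizing v with
  | _ L IH =>
    rcases run_cases v with ⟨n, rfl⟩ | ⟨n, c, t, hc, rfl⟩
    · rw [rep3_repl, rep2_repl, scan_repl, repl_mod_eq_ite]
    · have ht : t.length < L := by simp at hL; omega
      rw [rep3_repl_cons c hc, rep2_repl_cons c hc, scan_repl_cons c hc,
        IH t.length ht t rfl, repl_mod_eq_ite]

-- ===== VERDICT (by name: the statement is the Claim_ definition above) =====
theorem clean_bad_unicode_conversion_py_spec : Claim_equal_clean_bad_unicode_conversion_py := by
  intro row _
  unfold Spec_clean_bad_unicode_conversion_py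
  unfold clean_bad_unicode_conversion_py clean_bad_unicode_conversion_py_alt
  congr 2
  funext acc kv
  by_cases h : PySem.Chars.isIn ['?', '?'] kv.2.toList = false
  · simp [h]
  · simp only [h]
    rw [while3_eq, while2_eq, rep2_rep3_eq_scan]
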